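-- pv_equiv track=rewrite | github.com/ssk241-art/Ora2S3 | final_ora2s3_framework.py | strip_processing_extensions
-- ===== SOURCE A (Python) =====
-- def strip_processing_extensions(filename: str) -> str:
--     """Strip encryption/compression extensions to recover the base data filename."""
--     name = filename
--     for ext in (".gpg", ".pgp"):
--         if name.lower().endswith(ext):
--             name = name[: -len(ext)]
--             break
--     for ext in (".gz", ".bz2", ".zip"):
--         if name.lower().endswith(ext):
--             name = name[: -len(ext)]
--             break
--     return name
-- ===== SOURCE B (Python) =====
-- def strip_processing_extensions(filename: str) -> str:
--     """Strip encryption/compression extensions to recover the base data filename."""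
--     name = filename
--     for group in (("gpg", "pgp"), ("gz", "bz2", "zip")):
--         root, dot, ext = name.rpartition(".")
--         if dot and ext.lower() in group:
--             name = root
--     return name
-- ===== Notes on version B (the rewrite author's own statement) =====
-- stated objective: idiomatic
-- what changed: B replaces A's two endswith/slice loops by a single rpartition split at the last dot per stage and a case-insensitive membership test of the extension in each group.
import Mathlib
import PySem

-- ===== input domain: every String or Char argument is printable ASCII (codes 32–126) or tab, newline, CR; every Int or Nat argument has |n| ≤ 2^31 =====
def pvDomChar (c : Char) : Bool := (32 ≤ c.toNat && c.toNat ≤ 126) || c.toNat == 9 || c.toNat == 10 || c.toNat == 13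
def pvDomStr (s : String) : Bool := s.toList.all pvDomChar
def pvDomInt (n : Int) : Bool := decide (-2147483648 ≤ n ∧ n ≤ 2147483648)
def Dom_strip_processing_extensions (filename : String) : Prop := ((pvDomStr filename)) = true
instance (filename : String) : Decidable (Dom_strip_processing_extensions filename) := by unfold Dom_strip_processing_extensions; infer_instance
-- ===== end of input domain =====

-- B replaces A's two endswith/slice loops by one str.rpartition split at the last dot per
-- stage plus a case-insensitive membership test on the extension (objective: idiomatic).

-- ===== PORT A =====
def strip_processing_extensions (filename : String) : String :=
  let name := filename
  let name :=
    if PySem.Str.endswith (PySem.Str.lower name) ".gpg" then PySem.Str.slice name none (some (-4))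
    else if PySem.Str.endswith (PySem.Str.lower name) ".pgp" then PySem.Str.slice name none (some (-4))
    else name
  if PySem.Str.endswith (PySem.Str.lower name) ".gz" then PySem.Str.slice name none (some (-3))
  else if PySem.Str.endswith (PySem.Str.lower name) ".bz2" then PySem.Str.slice name none (some (-4))
  else if PySem.Str.endswith (PySem.Str.lower name) ".zip" then PySem.Str.slice name none (some (-4))
  else name

-- ===== PORT B =====
-- hand port of Python's str.rpartition(".") (exact for this one-char separator): split at the
-- LAST '.'; `none` plays the role of Python's ("", "", s), i.e. an empty middle component
def pvRpartitionDot (l : List Char) : Option (List Char × List Char) :=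
  let extRev := l.reverse.takeWhile (fun c => c ≠ '.')
  if extRev.length = l.length then none
  else some (l.take (l.length - extRev.length - 1), extRev.reverse)

-- body of B's loop: `root, dot, ext = name.rpartition("."); if dot and ext.lower() in group: name = root`
def pvStripGroup (group : List (List Char)) (name : List Char) : List Char :=
  match pvRpartitionDot name with
  | none => name
  | some (root, ext) => if PySem.Chars.lower ext ∈ group then root else name

def strip_processing_extensions_alt (filename : String) : String :=
  String.ofList
    (([[['g','p','g'], ['p','g','p']], [['g','z'], ['b','z','2'], ['z','i','p']]] : List (List (List Char))).foldl
      (fun name group => pvStripGroup group name) filename.toList)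

-- ===== PRECONDITION & SPEC =====
def Spec_strip_processing_extensions (filename : String) (out : String) : Prop := out = strip_processing_extensions_alt filename
instance (filename : String) (out : String) : Decidable (Spec_strip_processing_extensions filename out) := by unfold Spec_strip_processing_extensions; infer_instance

-- ===== CLAIM (what is proved, stated in full; the proofs are below) =====
def Claim_equal_strip_processing_extensions : Prop := ∀ (filename : String), Dom_strip_processing_extensions filename → Spec_strip_processing_extensions filename (strip_processing_extensions filename)

-- ===== LEMMAS AND PROOFS =====

theorem pvLowerChar_dot_iff (c : Char) : (PySem.Chars.lowerChar c = '.') ↔ c = '.' := by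
  unfold PySem.Chars.lowerChar
  split_ifs with h
  · simp only [PySem.Chars.isupper, Bool.and_eq_true, decide_eq_true_eq, Char.le_def] at h
    have h65 : (65 : UInt32) ≤ c.val := h.1
    have h65' : 65 ≤ c.toNat := UInt32.le_iff_toNat_le.mp h65
    constructor
    · intro he
      have h2 : (Char.ofNat (c.toNat + 32)).toNat = 46 := by rw [he]; rfl
      rw [Char.toNat_ofNat] at h2
      split_ifs at h2
      omega
    · intro hc
      subst hc
      exact absurd h65' (by decide)
  · rfl

theorem pvLower_eq_map (l : List Char) : PySem.Chars.lower l = l.map PySem.Chars.lowerChar := by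
  simp [PySem.Chars.lower]

theorem pvTakeWhile_lower (l : List Char) :
    (l.map PySem.Chars.lowerChar).takeWhile (fun c => c ≠ '.') =
      (l.takeWhile (fun c => c ≠ '.')).map PySem.Chars.lowerChar := by
  rw [List.takeWhile_map]
  have hp : ((fun c => decide (c ≠ '.')) ∘ PySem.Chars.lowerChar) = (fun c : Char => decide (c ≠ '.')) := by
    funext c; simp [Function.comp, pvLowerChar_dot_iff]
  rw [hp]

theorem pvDropWhile_cons_head_false {α : Type} (p : α → Bool) :
    ∀ (r : List α) (d : α) (dtail : List α), r.dropWhile p = d :: dtail → p d = false := by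
  intro r
  induction r with
  | nil => intro d dt h; simp [List.dropWhile] at h
  | cons a as ih =>
    intro d dt h
    by_cases hp : p a = true
    · rw [List.dropWhile_cons_of_pos hp] at h
      exact ih _ _ h
    · rw [List.dropWhile_cons_of_neg hp] at h
      cases h
      simpa using hp

theorem pvPrefix_iff_takeWhile (e r : List Char) (he : '.' ∉ e) :
    e ++ ['.'] <+: r ↔ (r.takeWhile (fun c => c ≠ '.') = e ∧ e.length < r.length) := by
  have hetw : e.takeWhile (fun c => c ≠ '.') = e := by
    rw [List.takeWhile_eq_self_iff]
    intro c hc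
    simp only [decide_eq_true_eq]
    exact fun h => he (h ▸ hc)
  constructor
  · rintro ⟨t, ht⟩
    subst ht
    rw [List.append_assoc]
    refine ⟨?_, by simp⟩
    rw [List.takeWhile_append, hetw]
    simp
  · rintro ⟨htw, hlen⟩
    have hsplit := (List.takeWhile_append_dropWhile (p := fun c => c ≠ '.') (l := r)).symm
    rw [htw] at hsplit
    rcases hc : r.dropWhile (fun c => c ≠ '.') with _ | ⟨d, dtail⟩
    · rw [hc, List.append_nil] at hsplit
      subst hsplit
      omega
    · have hd : ¬ (d ≠ '.') := by
        simpa using pvDropWhile_cons_head_false _ r d dtail hc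
      have hd' : d = '.' := by tauto
      subst hd'
      rw [hc] at hsplit
      exact ⟨dtail, by rw [List.append_assoc]; exact hsplit.symm⟩

theorem pvSuffix_iff_tw (l e : List Char) (he : '.' ∉ e) :
    ('.' :: e <:+ PySem.Chars.lower l) ↔
      ((l.reverse.takeWhile (fun c => c ≠ '.')).map PySem.Chars.lowerChar = e.reverse ∧
       (l.reverse.takeWhile (fun c => c ≠ '.')).length < l.length) := by
  rw [pvLower_eq_map]
  rw [← List.reverse_prefix]
  have h1 : ('.' :: e).reverse = e.reverse ++ ['.'] := by simp
  have h2 : (l.map PySem.Chars.lowerChar).reverse = l.reverse.map PySem.Chars.lowerChar := by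
    simp [List.map_reverse]
  rw [h1, h2]
  rw [pvPrefix_iff_takeWhile _ _ (by simpa using he)]
  rw [pvTakeWhile_lower]
  constructor
  · rintro ⟨ha, hb⟩
    have hlen2 : (l.reverse.takeWhile (fun c => c ≠ '.')).length = e.length := by
      have := congrArg List.length ha; simpa using this
    refine ⟨ha, ?_⟩
    simp only [List.length_reverse, List.length_map] at hb
    omega
  · rintro ⟨ha, hb⟩
    have hlen2 : (l.reverse.takeWhile (fun c => c ≠ '.')).length = e.length := by
      have := congrArg List.length ha; simpa using this
    refine ⟨ha, ?_⟩
    simp only [List.length_reverse, List.length_map]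
    omega

theorem pvTw_le (l : List Char) : (l.reverse.takeWhile (fun c => c ≠ '.')).length ≤ l.length := by
  calc (l.reverse.takeWhile (fun c => c ≠ '.')).length ≤ l.reverse.length :=
        (List.takeWhile_prefix _).length_le
    _ = l.length := List.length_reverse

theorem pvLowerRev (tw : List Char) :
    PySem.Chars.lower tw.reverse = (tw.map PySem.Chars.lowerChar).reverse := by
  rw [pvLower_eq_map, List.map_reverse]

theorem pvGroup1_eq (l : List Char) :
    (if '.' :: ['g','p','g'] <:+ PySem.Chars.lower l then l.take (l.length - 4)
     else if '.' :: ['p','g','p'] <:+ PySem.Chars.lower l then l.take (l.length - 4)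
     else l) = pvStripGroup [['g','p','g'], ['p','g','p']] l := by
  unfold pvStripGroup pvRpartitionDot
  by_cases hdot : (l.reverse.takeWhile (fun c => c ≠ '.')).length = l.length
  · have hA1 : ¬ ('.' :: ['g','p','g'] <:+ PySem.Chars.lower l) := by
      rw [pvSuffix_iff_tw _ _ (by decide)]; rintro ⟨-, h⟩; omega
    have hA2 : ¬ ('.' :: ['p','g','p'] <:+ PySem.Chars.lower l) := by
      rw [pvSuffix_iff_tw _ _ (by decide)]; rintro ⟨-, h⟩; omega
    simp only [hA1, hA2, if_false, hdot, if_pos]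
  · have hlt : (l.reverse.takeWhile (fun c => c ≠ '.')).length < l.length :=
      lt_of_le_of_ne (pvTw_le l) hdot
    simp only [hdot, if_false]
    have hmem : (PySem.Chars.lower (l.reverse.takeWhile (fun c => c ≠ '.')).reverse ∈
        [['g','p','g'], ['p','g','p']]) ↔
        ((l.reverse.takeWhile (fun c => c ≠ '.')).map PySem.Chars.lowerChar = ['g','p','g'].reverse ∨
         (l.reverse.takeWhile (fun c => c ≠ '.')).map PySem.Chars.lowerChar = ['p','g','p'].reverse) := by
      rw [pvLowerRev]
      constructor
      · intro h
        rcases List.mem_cons.mp h with h | h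
        · left; rw [← h]; simp
        · right
          rcases List.mem_cons.mp h with h | h
          · rw [← h]; simp
          · simp at h
      · rintro (h | h)
        · apply List.mem_cons.mpr; left
          rw [h]; rfl
        · apply List.mem_cons.mpr; right; apply List.mem_cons.mpr; left
          rw [h]; rfl
    rw [if_congr hmem rfl rfl]
    by_cases hm1 : (l.reverse.takeWhile (fun c => c ≠ '.')).map PySem.Chars.lowerChar = ['g','p','g'].reverse
    · have hlen3 : (l.reverse.takeWhile (fun c => c ≠ '.')).length = 3 := by
        have := congrArg List.length hm1; simpa using this
      have hA1 : ('.' :: ['g','p','g'] <:+ PySem.Chars.lower l) :=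
        (pvSuffix_iff_tw _ _ (by decide)).mpr ⟨hm1, hlt⟩
      rw [if_pos hA1, if_pos (Or.inl hm1), hlen3]
      congr 1
    · by_cases hm2 : (l.reverse.takeWhile (fun c => c ≠ '.')).map PySem.Chars.lowerChar = ['p','g','p'].reverse
      · have hlen3 : (l.reverse.takeWhile (fun c => c ≠ '.')).length = 3 := by
          have := congrArg List.length hm2; simpa using this
        have hA1 : ¬ ('.' :: ['g','p','g'] <:+ PySem.Chars.lower l) := by
          rw [pvSuffix_iff_tw _ _ (by decide)]; rintro ⟨h, -⟩; exact hm1 h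
        have hA2 : ('.' :: ['p','g','p'] <:+ PySem.Chars.lower l) :=
          (pvSuffix_iff_tw _ _ (by decide)).mpr ⟨hm2, hlt⟩
        rw [if_neg hA1, if_pos hA2, if_pos (Or.inr hm2), hlen3]
        congr 1
      · have hA1 : ¬ ('.' :: ['g','p','g'] <:+ PySem.Chars.lower l) := by
          rw [pvSuffix_iff_tw _ _ (by decide)]; rintro ⟨h, -⟩; exact hm1 h
        have hA2 : ¬ ('.' :: ['p','g','p'] <:+ PySem.Chars.lower l) := by
          rw [pvSuffix_iff_tw _ _ (by decide)]; rintro ⟨h, -⟩; exact hm2 h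
        rw [if_neg hA1, if_neg hA2, if_neg (by rintro (h | h) <;> [exact hm1 h; exact hm2 h])]

theorem pvGroup2_eq (l : List Char) :
    (if '.' :: ['g','z'] <:+ PySem.Chars.lower l then l.take (l.length - 3)
     else if '.' :: ['b','z','2'] <:+ PySem.Chars.lower l then l.take (l.length - 4)
     else if '.' :: ['z','i','p'] <:+ PySem.Chars.lower l then l.take (l.length - 4)
     else l) = pvStripGroup [['g','z'], ['b','z','2'], ['z','i','p']] l := by
  unfold pvStripGroup pvRpartitionDot
  by_cases hdot : (l.reverse.takeWhile (fun c => c ≠ '.')).length = l.length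
  · have hA1 : ¬ ('.' :: ['g','z'] <:+ PySem.Chars.lower l) := by
      rw [pvSuffix_iff_tw _ _ (by decide)]; rintro ⟨-, h⟩; omega
    have hA2 : ¬ ('.' :: ['b','z','2'] <:+ PySem.Chars.lower l) := by
      rw [pvSuffix_iff_tw _ _ (by decide)]; rintro ⟨-, h⟩; omega
    have hA3 : ¬ ('.' :: ['z','i','p'] <:+ PySem.Chars.lower l) := by
      rw [pvSuffix_iff_tw _ _ (by decide)]; rintro ⟨-, h⟩; omega
    simp only [hA1, hA2, hA3, if_false, hdot, if_pos]
  · have hlt : (l.reverse.takeWhile (fun c => c ≠ '.')).length < l.length :=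
      lt_of_le_of_ne (pvTw_le l) hdot
    simp only [hdot, if_false]
    have hmem : (PySem.Chars.lower (l.reverse.takeWhile (fun c => c ≠ '.')).reverse ∈
        [['g','z'], ['b','z','2'], ['z','i','p']]) ↔
        ((l.reverse.takeWhile (fun c => c ≠ '.')).map PySem.Chars.lowerChar = ['g','z'].reverse ∨
         (l.reverse.takeWhile (fun c => c ≠ '.')).map PySem.Chars.lowerChar = ['b','z','2'].reverse ∨
         (l.reverse.takeWhile (fun c => c ≠ '.')).map PySem.Chars.lowerChar = ['z','i','p'].reverse) := by
      rw [pvLowerRev]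
      constructor
      · intro h
        rcases List.mem_cons.mp h with h | h
        · left; rw [← h]; simp
        · rcases List.mem_cons.mp h with h | h
          · right; left; rw [← h]; simp
          · rcases List.mem_cons.mp h with h | h
            · right; right; rw [← h]; simp
            · simp at h
      · rintro (h | h | h)
        · apply List.mem_cons.mpr; left
          rw [h]; rfl
        · apply List.mem_cons.mpr; right; apply List.mem_cons.mpr; left
          rw [h]; rfl
        · apply List.mem_cons.mpr; right; apply List.mem_cons.mpr; right
          apply List.mem_cons.mpr; left
          rw [h]; rfl
    rw [if_congr hmem rfl rfl]
    by_cases hm1 : (l.reverse.takeWhile (fun c => c ≠ '.')).map PySem.Chars.lowerChar = ['g','z'].reverse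
    · have hlen3 : (l.reverse.takeWhile (fun c => c ≠ '.')).length = 2 := by
        have := congrArg List.length hm1; simpa using this
      have hA1 : ('.' :: ['g','z'] <:+ PySem.Chars.lower l) :=
        (pvSuffix_iff_tw _ _ (by decide)).mpr ⟨hm1, hlt⟩
      rw [if_pos hA1, if_pos (Or.inl hm1), hlen3]
      congr 1
    · have hA1 : ¬ ('.' :: ['g','z'] <:+ PySem.Chars.lower l) := by
        rw [pvSuffix_iff_tw _ _ (by decide)]; rintro ⟨h, -⟩; exact hm1 h
      by_cases hm2 : (l.reverse.takeWhile (fun c => c ≠ '.')).map PySem.Chars.lowerChar = ['b','z','2'].reverse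
      · have hlen3 : (l.reverse.takeWhile (fun c => c ≠ '.')).length = 3 := by
          have := congrArg List.length hm2; simpa using this
        have hA2 : ('.' :: ['b','z','2'] <:+ PySem.Chars.lower l) :=
          (pvSuffix_iff_tw _ _ (by decide)).mpr ⟨hm2, hlt⟩
        rw [if_neg hA1, if_pos hA2, if_pos (Or.inr (Or.inl hm2)), hlen3]
        congr 1
      · have hA2 : ¬ ('.' :: ['b','z','2'] <:+ PySem.Chars.lower l) := by
          rw [pvSuffix_iff_tw _ _ (by decide)]; rintro ⟨h, -⟩; exact hm2 h
        by_cases hm3 : (l.reverse.takeWhile (fun c => c ≠ '.')).map PySem.Chars.lowerChar = ['z','i','p'].reverse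
        · have hlen3 : (l.reverse.takeWhile (fun c => c ≠ '.')).length = 3 := by
            have := congrArg List.length hm3; simpa using this
          have hA3 : ('.' :: ['z','i','p'] <:+ PySem.Chars.lower l) :=
            (pvSuffix_iff_tw _ _ (by decide)).mpr ⟨hm3, hlt⟩
          rw [if_neg hA1, if_neg hA2, if_pos hA3, if_pos (Or.inr (Or.inr hm3)), hlen3]
          congr 1
        · have hA3 : ¬ ('.' :: ['z','i','p'] <:+ PySem.Chars.lower l) := by
            rw [pvSuffix_iff_tw _ _ (by decide)]; rintro ⟨h, -⟩; exact hm3 h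
          rw [if_neg hA1, if_neg hA2, if_neg hA3,
            if_neg (by rintro (h | h | h) <;> [exact hm1 h; exact hm2 h; exact hm3 h])]

theorem pvStageA (s : String) :
    (if PySem.Str.endswith (PySem.Str.lower s) ".gpg" then PySem.Str.slice s none (some (-4))
     else if PySem.Str.endswith (PySem.Str.lower s) ".pgp" then PySem.Str.slice s none (some (-4))
     else s).toList =
    (if '.' :: ['g','p','g'] <:+ PySem.Chars.lower s.toList then s.toList.take (s.toList.length - 4)
     else if '.' :: ['p','g','p'] <:+ PySem.Chars.lower s.toList then s.toList.take (s.toList.length - 4)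
     else s.toList) := by
  simp only [apply_ite String.toList]
  simp [pysem, PySem.Chars.endswith_iff]

theorem pvStageB (s : String) :
    (if PySem.Str.endswith (PySem.Str.lower s) ".gz" then PySem.Str.slice s none (some (-3))
     else if PySem.Str.endswith (PySem.Str.lower s) ".bz2" then PySem.Str.slice s none (some (-4))
     else if PySem.Str.endswith (PySem.Str.lower s) ".zip" then PySem.Str.slice s none (some (-4))
     else s).toList =
    (if '.' :: ['g','z'] <:+ PySem.Chars.lower s.toList then s.toList.take (s.toList.length - 3)
     else if '.' :: ['b','z','2'] <:+ PySem.Chars.lower s.toList then s.toList.take (s.toList.length - 4)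
     else if '.' :: ['z','i','p'] <:+ PySem.Chars.lower s.toList then s.toList.take (s.toList.length - 4)
     else s.toList) := by
  simp only [apply_ite String.toList]
  simp [pysem, PySem.Chars.endswith_iff]

theorem pvFinal (f : String) :
    (strip_processing_extensions f).toList = (strip_processing_extensions_alt f).toList := by
  unfold strip_processing_extensions
  rw [pvStageB, pvStageA, pvGroup1_eq, pvGroup2_eq]
  simp [strip_processing_extensions_alt, List.foldl]

-- ===== VERDICT (by name: the statement is the Claim_ definition above) =====
theorem strip_processing_extensions_spec : Claim_equal_strip_processing_extensions := by
  intro f _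
  unfold Spec_strip_processing_extensions
  exact String.toList_inj.mp (pvFinal f)
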